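-- pv_equiv track=rewrite | github.com/juanezamudio/static-site-generator | src/html_node_markdown.py | header_block_to_html_node
-- ===== SOURCE A (Python) =====
-- def header_block_to_html_node(block):
--     counter = 0
--
--     for char in block:
--         match char:
--             case '#':
--                 counter += 1
--             case _: break
--
--     stripped_block = block[counter:].lstrip()
--     header = ""
--
--     match counter:
--         case 1: header = "h1"
--         case 2: header =  "h2"
--         case 3: header = "h3"
--         case 4: header = "h4"
--         case 5: header = "h5"
--         case 6: header = "h6"
--         case _: raise ValueError("Not a valid header")
--
--     return header, stripped_block
-- ===== SOURCE B (Python) =====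
-- def header_block_to_html_node(block):
--     # Trial prefix matching: a level-n header is exactly the block starting with
--     # '#'*n but not '#'*(n+1); try the six fixed candidate prefixes, no counting.
--     for level in range(1, 7):
--         if block.startswith("#" * level) and not block.startswith("#" * (level + 1)):
--             return "h%d" % level, block[level:].lstrip()
--     raise ValueError("Not a valid header")
-- ===== Notes on version B (the rewrite author's own statement) =====
-- stated objective: alternative
-- what changed: Replaces A's character-counting loop and six-case match by trial matching against the six fixed candidate prefixes '#'*n (startswith with a not-one-more-hash check), returning on the unique match.
import Mathlib
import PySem

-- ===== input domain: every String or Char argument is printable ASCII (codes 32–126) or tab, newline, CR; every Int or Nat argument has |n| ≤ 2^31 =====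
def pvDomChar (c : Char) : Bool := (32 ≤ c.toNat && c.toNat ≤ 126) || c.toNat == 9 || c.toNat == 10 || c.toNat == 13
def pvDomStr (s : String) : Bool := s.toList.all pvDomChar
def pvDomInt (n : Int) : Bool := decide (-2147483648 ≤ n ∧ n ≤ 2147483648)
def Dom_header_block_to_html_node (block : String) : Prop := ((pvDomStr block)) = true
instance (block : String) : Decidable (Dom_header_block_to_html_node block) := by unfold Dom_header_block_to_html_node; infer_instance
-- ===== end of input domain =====

-- B replaces A's character-counting loop and six-case match by trial matching against the
-- six fixed candidate prefixes '#'*n (startswith, with a not-one-more-hash check): alternative.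


-- ===== PORT A =====
-- the 'for char in block: match … break' counting loop, as structural recursion
def pvCountLoopA : List Char → Nat
  | [] => 0
  | c :: rest => if c = '#' then pvCountLoopA rest + 1 else 0

def header_block_to_html_node (block : String) : String × String :=
  let counter : Nat := pvCountLoopA block.toList
  let stripped_block := PySem.Str.lstrip (PySem.Str.slice block (some (counter : Int)) none)
  let header : String :=
    match counter with
    | 1 => "h1"
    | 2 => "h2"
    | 3 => "h3"
    | 4 => "h4"
    | 5 => "h5"
    | 6 => "h6"
    | _ => ""          -- Python raises ValueError here; excluded by Pre_
  (header, stripped_block)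

-- ===== PORT B =====
-- 'for level in range(1, 7): if block.startswith("#"*level) and not block.startswith("#"*(level+1)): return …'
-- ("#" * k is ported by hand as String.ofList (List.replicate k '#'): exact for k ≥ 0)
def pvLevelLoopB (block : String) : List Int → Option (String × String)
  | [] => none
  | lvl :: rest =>
      if PySem.Str.startswith block (String.ofList (List.replicate lvl.toNat '#'))
         && !(PySem.Str.startswith block (String.ofList (List.replicate (lvl.toNat + 1) '#')))
      then some ("h" ++ PySem.Int.toStr lvl,
                 PySem.Str.lstrip (PySem.Str.slice block (some lvl) none))
      else pvLevelLoopB block rest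

def header_block_to_html_node_alt (block : String) : String × String :=
  match pvLevelLoopB block (PySem.List.pyRange 1 7 1) with
  | some r => r
  | none => ("", "")   -- Python raises ValueError here; excluded by Pre_

-- ===== PRECONDITION & SPEC =====
-- Pre_ excludes exactly the inputs where the leading-'#' count is 0 or > 6, on which A raises ValueError.
def Pre_header_block_to_html_node (block : String) : Prop :=
  1 ≤ (block.toList.takeWhile (· == '#')).length ∧ (block.toList.takeWhile (· == '#')).length ≤ 6
instance (block : String) : Decidable (Pre_header_block_to_html_node block) := by
  unfold Pre_header_block_to_html_node; infer_instance
def pvWitness_header_block_to_html_node : String := "## Title"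

def Spec_header_block_to_html_node (block : String) (out : String × String) : Prop := out = header_block_to_html_node_alt block
instance (block : String) (out : String × String) : Decidable (Spec_header_block_to_html_node block out) := by unfold Spec_header_block_to_html_node; infer_instance

-- ===== CLAIM (what is proved, stated in full; the proofs are below) =====
def Claim_equal_header_block_to_html_node : Prop := ∀ (block : String), Dom_header_block_to_html_node block → Pre_header_block_to_html_node block → Spec_header_block_to_html_node block (header_block_to_html_node block)

-- ===== LEMMAS AND PROOFS =====
theorem pvCountLoopA_eq_takeWhile (cs : List Char) :
    pvCountLoopA cs = (cs.takeWhile (· == '#')).length := by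
  induction cs with
  | nil => rfl
  | cons c rest ih =>
    by_cases h : c = '#' <;> simp [pvCountLoopA, h, ih]

theorem pvReplicate_prefix_iff (cs : List Char) (k : Nat) :
    (List.replicate k '#' <+: cs) ↔ k ≤ (cs.takeWhile (· == '#')).length := by
  induction cs generalizing k with
  | nil =>
    cases k with
    | zero => simp
    | succ k => simp [List.replicate_succ]
  | cons c rest ih =>
    cases k with
    | zero => simp
    | succ k =>
      rw [List.replicate_succ, List.cons_prefix_cons]
      by_cases h : c = '#'
      · simp [h, ih]
      · simp [h, Ne.symm h]

theorem pvStartswith_hashes (block : String) (k : Nat) :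
    PySem.Chars.startswith block.toList (List.replicate k '#')
      = decide (k ≤ (block.toList.takeWhile (· == '#')).length) := by
  by_cases h : k ≤ (block.toList.takeWhile (· == '#')).length
  · simp only [h, decide_true]
    exact (PySem.Chars.startswith_iff _ _).mpr ((pvReplicate_prefix_iff _ _).mpr h)
  · simp only [h, decide_false]
    rcases hb : PySem.Chars.startswith block.toList (List.replicate k '#') with _ | _
    · rfl
    · exact absurd ((pvReplicate_prefix_iff _ _).mp
        ((PySem.Chars.startswith_iff _ _).mp hb)) h

-- ===== VERDICT (by name: the statement is the Claim_ definition above) =====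
theorem header_block_to_html_node_spec : Claim_equal_header_block_to_html_node := by
  intro block _hdom hpre
  obtain ⟨h1, h6⟩ := hpre
  unfold Spec_header_block_to_html_node header_block_to_html_node header_block_to_html_node_alt
  have hct := pvCountLoopA_eq_takeWhile block.toList
  have hsw := pvStartswith_hashes block
  set n := (block.toList.takeWhile (· == '#')).length with hn
  clear_value n
  have e1 : PySem.Chars.startswith block.toList ['#'] = decide (1 ≤ n) := by simpa [List.replicate] using hsw 1
  have e2 : PySem.Chars.startswith block.toList ['#','#'] = decide (2 ≤ n) := by simpa [List.replicate] using hsw 2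
  have e3 : PySem.Chars.startswith block.toList ['#','#','#'] = decide (3 ≤ n) := by simpa [List.replicate] using hsw 3
  have e4 : PySem.Chars.startswith block.toList ['#','#','#','#'] = decide (4 ≤ n) := by simpa [List.replicate] using hsw 4
  have e5 : PySem.Chars.startswith block.toList ['#','#','#','#','#'] = decide (5 ≤ n) := by simpa [List.replicate] using hsw 5
  have e6 : PySem.Chars.startswith block.toList ['#','#','#','#','#','#'] = decide (6 ≤ n) := by simpa [List.replicate] using hsw 6
  have e7 : PySem.Chars.startswith block.toList ['#','#','#','#','#','#','#'] = decide (7 ≤ n) := by simpa [List.replicate] using hsw 7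
  have hrange : PySem.List.pyRange 1 7 1 = [1, 2, 3, 4, 5, 6] := by decide
  rw [hct, hrange]
  interval_cases n <;>
    simp [pvLevelLoopB, e1, e2, e3, e4, e5, e6, e7] <;> decide
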